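-- pv_equiv track=rewrite | github.com/1zbbxzak1/T-bank | algorithms/homework/second_contest/D.py | delete_balloons
-- ===== SOURCE A (Python) =====
-- def delete_balloons(n: int, color_balloons: list) -> int:
--     stack = []
--     result = 0
--     i = 0
--
--     while i < n:
--         color = color_balloons[i]
--
--         if not stack or stack[-1][0] != color:
--             stack.append([color, 1])
--         else:
--             stack[-1][1] += 1
--
--         if stack[-1][1] >= 3:
--             j = i + 1
--             while j < n and color_balloons[j] == color:
--                 stack[-1][1] += 1
--                 j += 1
--
--             result += stack[-1][1]
--             while stack and stack[-1][1] >= 3: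
--                 stack.pop()
--
--             i = j - 1
--
--         i += 1
--
--     return result
-- ===== SOURCE B (Python) =====
-- def delete_balloons(n: int, color_balloons: list) -> int:
--     # B: run-length encode the first n balloons, then fold the runs through a
--     # run-stack, merging a run with the exposed same-color top and counting
--     # every (merged) run that reaches size >= 3 as removed.
--     runs = []
--     for i in range(n):
--         c = color_balloons[i]
--         if runs and runs[-1][0] == c:
--             runs[-1] = (c, runs[-1][1] + 1)
--         else:
--             runs.append((c, 1))
--     result = 0
--     stack = []
--     for c, k in runs:
--         if stack and stack[-1][0] == c:
--             k += stack.pop()[1]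
--         if k >= 3:
--             result += k
--         else:
--             stack.append((c, k))
--     return result
-- ===== Notes on version B (the rewrite author's own statement) =====
-- stated objective: alternative
-- what changed: Replaces A's single element-wise scan (mutable stack of [color,count] with an inner index loop that jump-absorbs the rest of a run and a pop-while) by two phases: run-length encode the first n balloons, then fold the runs through a run-stack that merges a run with an exposed same-color top and counts any merged run of size >= 3 as removed.
import Mathlib
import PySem

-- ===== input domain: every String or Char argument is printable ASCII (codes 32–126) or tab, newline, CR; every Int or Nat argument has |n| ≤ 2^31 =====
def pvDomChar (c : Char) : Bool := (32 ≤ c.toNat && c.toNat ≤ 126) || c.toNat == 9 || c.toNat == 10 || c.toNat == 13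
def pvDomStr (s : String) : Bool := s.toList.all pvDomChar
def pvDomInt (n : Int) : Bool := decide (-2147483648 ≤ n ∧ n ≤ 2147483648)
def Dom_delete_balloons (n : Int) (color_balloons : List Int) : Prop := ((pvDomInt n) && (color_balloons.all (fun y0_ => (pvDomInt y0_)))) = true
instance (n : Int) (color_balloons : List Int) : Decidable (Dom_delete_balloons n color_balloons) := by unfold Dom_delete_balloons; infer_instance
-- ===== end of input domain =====

-- B replaces A's element-wise scan (mutable stack with an inner absorbing index loop)
-- by run-length encoding the first n balloons and folding the runs through a run-stack;
-- objective: alternative (same O(n) cost, different algorithmic decomposition).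

-- ===== PORT A =====
-- Python stacks are ported with head = top (stack[-1]).
-- A's `while stack and stack[-1][1] >= 3: stack.pop()` loop:
def popW : List (Int × Int) → List (Int × Int)
  | [] => []
  | (c, k) :: st => if k ≥ 3 then popW st else (c, k) :: st

-- the stack update at the top of A's loop body (`stack.append([color, 1])` / `stack[-1][1] += 1`)
def aStep (stack : List (Int × Int)) (color : Int) : List (Int × Int) :=
  match stack with
  | [] => [(color, 1)]
  | (c0, k0) :: st => if c0 ≠ color then (color, 1) :: (c0, k0) :: st else (c0, k0 + 1) :: st

-- termination-measure facts for the ports' Int-indexed loops (cited by decreasing_by)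
theorem pvFuelLt {n j : Int} (h : j < n) : (n - (j + 1)).toNat < (n - j).toNat := by omega
theorem pvFuelLt' {n i t : Int} (h : i < n) (h2 : i + 1 ≤ t) :
    (n - (t - 1 + 1)).toNat < (n - i).toNat := by omega

-- A's inner `while j < n and color_balloons[j] == color` loop; returns the final (j, stack[-1][1])
def jscan (n : Int) (cb : List Int) (color : Int) (j : Int) (cnt : Int) : Int × Int :=
  if h : j < n then
    match PySem.List.pyGet? cb j with
    | none => (j, cnt)       -- Python raises IndexError here (only when n > len(cb)); outside Pre_
    | some c => if c = color then jscan n cb color (j + 1) (cnt + 1) else (j, cnt)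
  else (j, cnt)
termination_by (n - j).toNat
decreasing_by exact pvFuelLt h

-- needed by aLoop's termination proof: the inner loop never moves j backwards
theorem jscan_fst_ge_aux (k : Nat) : ∀ (n : Int) (cb : List Int) (color j cnt : Int),
    (n - j).toNat ≤ k → j ≤ (jscan n cb color j cnt).1 := by
  induction k with
  | zero =>
    intro n cb color j cnt hk
    rw [jscan]
    split
    · next h => exact absurd h (by omega)
    · simp
  | succ k ih =>
    intro n cb color j cnt hk
    rw [jscan]
    split
    · next h =>
      cases hg : PySem.List.pyGet? cb j with
      | none => simp
      | some c =>
        simp only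
        split
        · have := ih n cb color (j + 1) (cnt + 1) (by omega)
          omega
        · simp
    · simp

theorem jscan_fst_ge (n : Int) (cb : List Int) (color j cnt : Int) :
    j ≤ (jscan n cb color j cnt).1 :=
  jscan_fst_ge_aux (n - j).toNat n cb color j cnt le_rfl

-- A's outer `while i < n` loop
def aLoop (n : Int) (cb : List Int) (stack : List (Int × Int)) (result : Int) (i : Int) : Int :=
  if h : i < n then
    match PySem.List.pyGet? cb i with
    | none => result          -- Python raises IndexError here (only when n > len(cb)); outside Pre_
    | some color =>
      match aStep stack color with
      | [] => result          -- unreachable: aStep never returns []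
      | (c1, k1) :: st1 =>
        if k1 ≥ 3 then
          aLoop n cb (popW ((c1, (jscan n cb color (i + 1) k1).2) :: st1))
            (result + (jscan n cb color (i + 1) k1).2)
            ((jscan n cb color (i + 1) k1).1 - 1 + 1)
        else aLoop n cb ((c1, k1) :: st1) result (i + 1)
  else result
termination_by (n - i).toNat
decreasing_by
  · exact pvFuelLt' h (jscan_fst_ge n cb color (i + 1) k1)
  · exact pvFuelLt h

def delete_balloons (n : Int) (color_balloons : List Int) : Int :=
  aLoop n color_balloons [] 0 0

-- ===== PORT B =====
-- B's first loop: run-length encode the first n balloons. `runs` is kept reversed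
-- (head = Python's runs[-1]); delete_balloons_alt reverses it before the second loop.
def bRuns (n : Int) (cb : List Int) (i : Int) (acc : List (Int × Int)) : List (Int × Int) :=
  if h : i < n then
    match PySem.List.pyGet? cb i with
    | none => acc             -- Python raises IndexError here (only when n > len(cb)); outside Pre_
    | some c =>
      match acc with
      | (c0, k0) :: t => if c0 = c then bRuns n cb (i + 1) ((c0, k0 + 1) :: t)
                         else bRuns n cb (i + 1) ((c, 1) :: (c0, k0) :: t)
      | [] => bRuns n cb (i + 1) [(c, 1)]
  else acc
termination_by (n - i).toNat
decreasing_by all_goals exact pvFuelLt h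

-- B's second loop: fold the runs through a run-stack (head = Python's stack[-1]),
-- merging with an exposed same-color top, counting any merged run of size >= 3
def bScan : List (Int × Int) → List (Int × Int) → Int → Int
  | [], _, r => r
  | (c, k) :: rs, stack, r =>
    match stack with
    | (c0, k0) :: st =>
      if c0 = c then
        if k + k0 ≥ 3 then bScan rs st (r + (k + k0)) else bScan rs ((c, k + k0) :: st) r
      else
        if k ≥ 3 then bScan rs ((c0, k0) :: st) (r + k) else bScan rs ((c, k) :: (c0, k0) :: st) r
    | [] => if k ≥ 3 then bScan rs [] (r + k) else bScan rs [(c, k)] r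

def delete_balloons_alt (n : Int) (color_balloons : List Int) : Int :=
  bScan (bRuns n color_balloons 0 []).reverse [] 0

-- ===== PRECONDITION & SPEC =====
-- Pre_ excludes exactly the inputs on which A raises IndexError (n > len(color_balloons)).
def Pre_delete_balloons (n : Int) (color_balloons : List Int) : Prop :=
  n ≤ (color_balloons.length : Int)
instance (n : Int) (color_balloons : List Int) : Decidable (Pre_delete_balloons n color_balloons) := by
  unfold Pre_delete_balloons; infer_instance

def pvWitness_delete_balloons : Int × List Int := (4, [1, 1, 1, 2])

def Spec_delete_balloons (n : Int) (color_balloons : List Int) (out : Int) : Prop := out = delete_balloons_alt n color_balloons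
instance (n : Int) (color_balloons : List Int) (out : Int) : Decidable (Spec_delete_balloons n color_balloons out) := by unfold Spec_delete_balloons; infer_instance

-- ===== CLAIM (what is proved, stated in full; the proofs are below) =====
def Claim_equal_delete_balloons : Prop := ∀ (n : Int) (color_balloons : List Int), Dom_delete_balloons n color_balloons → Pre_delete_balloons n color_balloons → Spec_delete_balloons n color_balloons (delete_balloons n color_balloons)

-- ===== LEMMAS AND PROOFS =====

-- a general list fact: dropWhile is drop of the takeWhile length
theorem dropWhile_eq_drop_len (p : Int → Bool) (l : List Int) :
    l.dropWhile p = l.drop (l.takeWhile p).length := by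
  induction l with
  | nil => simp
  | cons a l ih =>
    by_cases h : p a <;> simp [h, ih]

theorem popW_eq_self (st : List (Int × Int)) (h : ∀ p ∈ st, p.2 ≤ 2) : popW st = st := by
  cases st with
  | nil => rfl
  | cons a t =>
    obtain ⟨c, k⟩ := a
    have hk := h (c, k) (by simp)
    simp only [popW]
    rw [if_neg (by simp at hk ⊢; omega)]

-- termination-measure facts for the proof-side list recursions (cited by decreasing_by)
theorem pvDropLt {c : Int} {l : List Int} (p : Int → Bool) :
    (l.dropWhile p).length < (c :: l).length := by
  have := List.length_dropWhile_le p l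
  simp only [List.length_cons]
  omega
theorem pvTailLt {c : Int} {l : List Int} : l.length < (c :: l).length := by
  simp only [List.length_cons]
  omega

-- A's loop, re-expressed element-wise over the list of the first n balloons
def fA : List Int → List (Int × Int) → Int → Int
  | [], _, r => r
  | c :: rest, stack, r =>
    match aStep stack c with
    | [] => r
    | (c1, k1) :: st1 =>
      if k1 ≥ 3 then
        fA (rest.dropWhile (· == c))
          (popW ((c1, k1 + ((rest.takeWhile (· == c)).length : Int)) :: st1))
          (r + (k1 + ((rest.takeWhile (· == c)).length : Int)))
      else fA rest ((c1, k1) :: st1) r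
termination_by l _ _ => l.length
decreasing_by
  · exact pvDropLt (· == c)
  · exact pvTailLt

theorem jscan_eq_aux (k : Nat) : ∀ (n : Int) (cb : List Int) (color : Int) (j cnt : Int),
    (n - j).toNat ≤ k → 0 ≤ j → n ≤ (cb.length : Int) →
    jscan n cb color j cnt =
      (j + ((((cb.take n.toNat).drop j.toNat).takeWhile (· == color)).length : Int),
       cnt + ((((cb.take n.toNat).drop j.toNat).takeWhile (· == color)).length : Int)) := by
  induction k with
  | zero =>
    intro n cb color j cnt hk hj hn
    rw [jscan]
    split
    · next hjn => exact absurd hjn (by omega)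
    · next hjn =>
      rw [List.drop_eq_nil_of_le (by simp only [List.length_take]; omega)]
      simp
  | succ k ih =>
    intro n cb color j cnt hk hj hn
    rw [jscan]
    split
    · next hjn =>
      rw [PySem.List.pyGet?_eq_some_getElem cb hj (by omega)]
      dsimp only
      have hjt : j.toNat < (cb.take n.toNat).length := by
        simp only [List.length_take]; omega
      rw [List.drop_eq_getElem_cons hjt, List.getElem_take, List.takeWhile_cons]
      by_cases hc : cb[j.toNat] = color
      · rw [if_pos hc, if_pos (by simp [hc])]
        rw [ih n cb color (j + 1) (cnt + 1) (by omega) (by omega) hn]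
        have hidx : (j + 1).toNat = j.toNat + 1 := by omega
        rw [hidx]
        simp only [Prod.mk.injEq, List.length_cons]
        push_cast
        omega
      · rw [if_neg hc, if_neg (by simp [hc])]
        simp
    · next hjn =>
      rw [List.drop_eq_nil_of_le (by simp only [List.length_take]; omega)]
      simp

theorem jscan_eq (n : Int) (cb : List Int) (color : Int) (j cnt : Int)
    (hj : 0 ≤ j) (hn : n ≤ (cb.length : Int)) :
    jscan n cb color j cnt =
      (j + ((((cb.take n.toNat).drop j.toNat).takeWhile (· == color)).length : Int),
       cnt + ((((cb.take n.toNat).drop j.toNat).takeWhile (· == color)).length : Int)) :=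
  jscan_eq_aux (n - j).toNat n cb color j cnt le_rfl hj hn

theorem aLoop_eq_aux (k : Nat) : ∀ (n : Int) (cb : List Int) (stack : List (Int × Int)) (r i : Int),
    (n - i).toNat ≤ k → 0 ≤ i → n ≤ (cb.length : Int) →
    aLoop n cb stack r i = fA ((cb.take n.toNat).drop i.toNat) stack r := by
  induction k with
  | zero =>
    intro n cb stack r i hk hi hn
    rw [aLoop]
    split
    · next hin => exact absurd hin (by omega)
    · next hin =>
      rw [List.drop_eq_nil_of_le (by simp only [List.length_take]; omega)]
      simp [fA]
  | succ k ih =>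
    intro n cb stack r i hk hi hn
    rw [aLoop]
    split
    · next hin =>
      rw [PySem.List.pyGet?_eq_some_getElem cb hi (by omega)]
      dsimp only
      have hit : i.toNat < (cb.take n.toNat).length := by
        simp only [List.length_take]; omega
      rw [List.drop_eq_getElem_cons hit, List.getElem_take]
      simp only [fA]
      cases haS : aStep stack cb[i.toNat] with
      | nil => simp
      | cons a st1 =>
        obtain ⟨c1, k1⟩ := a
        dsimp only
        have hidx : (i + 1).toNat = i.toNat + 1 := by omega
        by_cases hk3 : k1 ≥ 3
        · rw [if_pos hk3, if_pos hk3]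
          rw [jscan_eq n cb cb[i.toNat] (i + 1) k1 (by omega) hn]
          dsimp only
          rw [hidx]
          have hnn : (0:Int) ≤ ((((cb.take n.toNat).drop (i.toNat + 1)).takeWhile (· == cb[i.toNat])).length : Int) := by
            positivity
          rw [ih n cb _ _ _ (by omega) (by omega) hn]
          have hdr : ((i + 1 +
              ((((cb.take n.toNat).drop (i.toNat + 1)).takeWhile (· == cb[i.toNat])).length : Int))
              - 1 + 1).toNat
              = (i.toNat + 1) +
                (((cb.take n.toNat).drop (i.toNat + 1)).takeWhile (· == cb[i.toNat])).length := by
            omega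
          rw [hdr, ← List.drop_drop, ← dropWhile_eq_drop_len]
        · rw [if_neg hk3, if_neg hk3]
          rw [ih n cb _ _ (i + 1) (by omega) (by omega) hn, hidx]
    · next hin =>
      rw [List.drop_eq_nil_of_le (by simp only [List.length_take]; omega)]
      simp [fA]

theorem aLoop_eq (n : Int) (cb : List Int) (stack : List (Int × Int)) (r i : Int)
    (hi : 0 ≤ i) (hn : n ≤ (cb.length : Int)) :
    aLoop n cb stack r i = fA ((cb.take n.toNat).drop i.toNat) stack r :=
  aLoop_eq_aux (n - i).toNat n cb stack r i le_rfl hi hn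

-- the run decomposition of a list (colors of adjacent runs are distinct)
def rleSpec : List Int → List (Int × Int)
  | [] => []
  | c :: rest => (c, 1 + ((rest.takeWhile (· == c)).length : Int)) :: rleSpec (rest.dropWhile (· == c))
termination_by l => l.length
decreasing_by exact pvDropLt (· == c)

-- bRuns, re-expressed element-wise over the list of the first n balloons
def rleRev : List Int → List (Int × Int) → List (Int × Int)
  | [], acc => acc
  | c :: rest, acc =>
    match acc with
    | (c0, k0) :: t => if c0 = c then rleRev rest ((c0, k0 + 1) :: t)
                       else rleRev rest ((c, 1) :: (c0, k0) :: t)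
    | [] => rleRev rest [(c, 1)]

theorem bRuns_eq_aux (k : Nat) : ∀ (n : Int) (cb : List Int) (i : Int) (acc : List (Int × Int)),
    (n - i).toNat ≤ k → 0 ≤ i → n ≤ (cb.length : Int) →
    bRuns n cb i acc = rleRev ((cb.take n.toNat).drop i.toNat) acc := by
  induction k with
  | zero =>
    intro n cb i acc hk hi hn
    rw [bRuns]
    split
    · next hin => exact absurd hin (by omega)
    · next hin =>
      rw [List.drop_eq_nil_of_le (by simp only [List.length_take]; omega)]
      simp [rleRev]
  | succ k ih =>
    intro n cb i acc hk hi hn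
    rw [bRuns]
    split
    · next hin =>
      rw [PySem.List.pyGet?_eq_some_getElem cb hi (by omega)]
      dsimp only
      have hit : i.toNat < (cb.take n.toNat).length := by
        simp only [List.length_take]; omega
      rw [List.drop_eq_getElem_cons hit, List.getElem_take]
      simp only [rleRev]
      have hidx : (i + 1).toNat = i.toNat + 1 := by omega
      cases acc with
      | nil =>
        rw [ih n cb (i + 1) _ (by omega) (by omega) hn, hidx]
      | cons a t =>
        obtain ⟨c0, k0⟩ := a
        dsimp only
        by_cases hc : c0 = cb[i.toNat]
        · rw [if_pos hc, if_pos hc, ih n cb (i + 1) _ (by omega) (by omega) hn, hidx]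
        · rw [if_neg hc, if_neg hc, ih n cb (i + 1) _ (by omega) (by omega) hn, hidx]
    · next hin =>
      rw [List.drop_eq_nil_of_le (by simp only [List.length_take]; omega)]
      simp [rleRev]

theorem bRuns_eq (n : Int) (cb : List Int) (i : Int) (acc : List (Int × Int))
    (hi : 0 ≤ i) (hn : n ≤ (cb.length : Int)) :
    bRuns n cb i acc = rleRev ((cb.take n.toNat).drop i.toNat) acc :=
  bRuns_eq_aux (n - i).toNat n cb i acc le_rfl hi hn

theorem rleRev_rev (L : List Int) : ∀ (c0 k0 : Int) (t : List (Int × Int)),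
    (rleRev L ((c0, k0) :: t)).reverse =
      t.reverse ++ (c0, k0 + ((L.takeWhile (· == c0)).length : Int)) :: rleSpec (L.dropWhile (· == c0)) := by
  induction L with
  | nil => intro c0 k0 t; simp [rleRev, rleSpec]
  | cons d rest ih =>
    intro c0 k0 t
    simp only [rleRev]
    by_cases hd : c0 = d
    · subst hd
      rw [if_pos rfl, ih]
      simp only [List.takeWhile_cons, List.dropWhile_cons, beq_self_eq_true, if_true,
        List.length_cons]
      congr 3
      push_cast
      ring
    · rw [if_neg hd, ih]
      have hb : (d == c0) = false := by simp [Ne.symm hd]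
      simp only [List.takeWhile_cons, List.dropWhile_cons, hb, Bool.false_eq_true, if_false,
        List.length_nil, Nat.cast_zero, add_zero, List.reverse_cons]
      rw [rleSpec]
      simp
  

theorem rleRev_nil (L : List Int) : (rleRev L []).reverse = rleSpec L := by
  cases L with
  | nil => simp [rleRev, rleSpec]
  | cons c rest =>
    simp only [rleRev]
    rw [rleRev_rev, rleSpec]
    simp

-- feeding one maximal run of color c into fA with top (c, j), 1 ≤ j ≤ 2
theorem run_fA (c : Int) (stack : List (Int × Int)) (hst : ∀ p ∈ stack, 1 ≤ p.2 ∧ p.2 ≤ 2) :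
    ∀ (rest : List Int) (j r : Int), 1 ≤ j → j ≤ 2 →
    fA rest ((c, j) :: stack) r =
      if 3 ≤ j + ((rest.takeWhile (· == c)).length : Int)
      then fA (rest.dropWhile (· == c)) stack (r + (j + ((rest.takeWhile (· == c)).length : Int)))
      else fA (rest.dropWhile (· == c)) ((c, j + ((rest.takeWhile (· == c)).length : Int)) :: stack) r := by
  intro rest
  induction rest with
  | nil =>
    intro j r h1 h2
    simp only [List.takeWhile_nil, List.dropWhile_nil, List.length_nil, Nat.cast_zero, add_zero]
    rw [if_neg (by omega)]
  | cons d rest' ih =>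
    intro j r h1 h2
    by_cases hd : d = c
    · subst hd
      have haS : aStep ((d, j) :: stack) d = (d, j + 1) :: stack := by simp [aStep]
      simp only [fA, haS]
      simp only [List.takeWhile_cons, List.dropWhile_cons, beq_self_eq_true, if_true,
        List.length_cons]
      by_cases h3 : (3:Int) ≤ j + 1
      · rw [if_pos (show j + 1 ≥ 3 from h3)]
        have htw : (0:Int) ≤ ((rest'.takeWhile (· == d)).length : Int) := by positivity
        simp only [popW]
        rw [if_pos (by omega), popW_eq_self stack (fun p hp => (hst p hp).2)]
        rw [if_pos (by push_cast; omega)]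
        congr 1
        push_cast
        ring
      · rw [if_neg (show ¬ (j + 1 ≥ 3) from h3)]
        rw [ih (j + 1) r (by omega) (by omega)]
        by_cases h4 : (3:Int) ≤ j + 1 + ((rest'.takeWhile (· == d)).length : Int)
        · rw [if_pos h4, if_pos (by push_cast; omega)]
          congr 1
          push_cast
          ring
        · rw [if_neg h4, if_neg (by push_cast; omega)]
          congr 3
          push_cast
          ring
    · have hb : (d == c) = false := by simp [hd]
      simp only [List.takeWhile_cons, List.dropWhile_cons, hb, Bool.false_eq_true, if_false,
        List.length_nil, Nat.cast_zero, add_zero]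
      rw [if_neg (by omega)]

theorem fA_eq_bScan_aux (k : Nat) : ∀ (elems : List Int) (stack : List (Int × Int)) (r : Int),
    elems.length ≤ k → (∀ p ∈ stack, 1 ≤ p.2 ∧ p.2 ≤ 2) →
    fA elems stack r = bScan (rleSpec elems) stack r := by
  induction k with
  | zero =>
    intro elems stack r hk hst
    cases elems with
    | nil => simp [fA, rleSpec, bScan]
    | cons c rest => exact absurd hk (by simp)
  | succ k ih =>
    intro elems stack r hk hst
    cases elems with
    | nil => simp [fA, rleSpec, bScan]
    | cons c rest =>
      have htw : (0:Int) ≤ ((rest.takeWhile (· == c)).length : Int) := by positivity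
      have hlen : (rest.dropWhile (· == c)).length < (c :: rest).length := by
        have := List.length_dropWhile_le (· == c) rest
        simp only [List.length_cons]; omega
      rw [rleSpec]
      simp only [bScan]
      cases stack with
      | nil =>
        dsimp only
        have haS : aStep [] c = [(c, 1)] := by simp [aStep]
        simp only [fA, haS]
        rw [if_neg (by omega)]
        rw [run_fA c [] (by simp) rest 1 r (by omega) (by omega)]
        by_cases h3 : (3:Int) ≤ 1 + ((rest.takeWhile (· == c)).length : Int)
        · rw [if_pos h3, if_pos (show (1:Int) + _ ≥ 3 from h3)]
          rw [ih (rest.dropWhile (· == c)) _ _ (by omega) (by simp)]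
        · rw [if_neg h3, if_neg (show ¬ ((1:Int) + _ ≥ 3) from h3)]
          rw [ih (rest.dropWhile (· == c)) _ _ (by omega) (by intro p hp; simp at hp; subst hp; constructor <;> (simp; try omega))]
      | cons a st =>
        obtain ⟨c0, k0⟩ := a
        have hk0 := hst (c0, k0) (by simp)
        simp only at hk0
        dsimp only
        by_cases hc : c0 = c
        · rw [if_pos hc]
          subst hc
          rw [run_fA c0 st (fun p hp => hst p (by simp [hp])) (c0 :: rest) k0 r hk0.1 hk0.2]
          simp only [List.takeWhile_cons, List.dropWhile_cons, beq_self_eq_true, if_true,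
            List.length_cons]
          by_cases h3 : (3:Int) ≤ k0 + ((rest.takeWhile (· == c0)).length + 1 : Nat)
          · rw [if_pos h3, if_pos (by push_cast at h3 ⊢; omega)]
            rw [ih (rest.dropWhile (· == c0)) _ _ (by omega) (fun p hp => hst p (by simp [hp]))]
            congr 1
            push_cast
            ring
          · rw [if_neg h3, if_neg (by push_cast at h3 ⊢; omega)]
            push_cast at h3
            rw [ih (rest.dropWhile (· == c0)) _ _ (by omega) ?_]
            · congr 3
              push_cast
              ring
            · intro p hp
              simp only [List.mem_cons] at hp
              rcases hp with hp | hp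
              · subst hp; constructor <;> (simp; try omega)
              · exact hst p (by simp [hp])
        · rw [if_neg hc]
          have haS : aStep ((c0, k0) :: st) c = (c, 1) :: (c0, k0) :: st := by
            simp [aStep, hc]
          simp only [fA, haS]
          rw [if_neg (by omega)]
          rw [run_fA c ((c0, k0) :: st) hst rest 1 r (by omega) (by omega)]
          by_cases h3 : (3:Int) ≤ 1 + ((rest.takeWhile (· == c)).length : Int)
          · rw [if_pos h3, if_pos (show (1:Int) + _ ≥ 3 from h3)]
            rw [ih (rest.dropWhile (· == c)) _ _ (by omega) hst]
          · rw [if_neg h3, if_neg (show ¬ ((1:Int) + _ ≥ 3) from h3)]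
            rw [ih (rest.dropWhile (· == c)) _ _ (by omega) ?_]
            intro p hp
            simp only [List.mem_cons] at hp
            rcases hp with hp | hp
            · subst hp; constructor <;> (simp; try omega)
            · exact hst p (by simp [hp])

theorem fA_eq_bScan (elems : List Int) (stack : List (Int × Int)) (r : Int)
    (hst : ∀ p ∈ stack, 1 ≤ p.2 ∧ p.2 ≤ 2) :
    fA elems stack r = bScan (rleSpec elems) stack r :=
  fA_eq_bScan_aux elems.length elems stack r le_rfl hst

-- ===== VERDICT (by name: the statement is the Claim_ definition above) =====
theorem delete_balloons_spec : Claim_equal_delete_balloons := by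
  intro n cb _ hpre
  unfold Spec_delete_balloons delete_balloons delete_balloons_alt
  unfold Pre_delete_balloons at hpre
  rw [aLoop_eq n cb [] 0 0 le_rfl hpre, bRuns_eq n cb 0 [] le_rfl hpre]
  simp only [Int.toNat_zero, List.drop_zero]
  rw [fA_eq_bScan _ _ _ (by simp), rleRev_nil]
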